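-- pv_equiv track=rewrite | github.com/Anthonyhunter2/advent | day6_pt1.py | loopedlist
-- ===== SOURCE A (Python) =====
-- def loopedlist(stuff,times, ind):
-- 	stuff[ind] = 0
-- 	while times > 0:
-- 		try:
-- 			ind = ind + 1
-- 			stuff[ind] = stuff[ind] +1
-- 			times -= 1
-- 		except IndexError:
-- 			ind = -1
-- 	return(stuff)
-- ===== SOURCE B (Python) =====
-- def loopedlist(stuff, times, ind):
--     n = len(stuff)
--     stuff[ind] = 0
--     if times <= 0:
--         return stuff
--     q, r = divmod(times, n)
--     start = (ind + 1) % n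
--     return [v + q + (1 if (i - start) % n < r else 0) for i, v in enumerate(stuff)]
-- ===== Notes on version B (the rewrite author's own statement) =====
-- stated objective: alternative
-- what changed: B replaces A's one-increment-at-a-time cyclic while loop with closed-form modular arithmetic: divmod(times, n) gives every slot times//n and the first times%n slots after ind an extra 1, built in a single pass over the list.
import Mathlib
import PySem

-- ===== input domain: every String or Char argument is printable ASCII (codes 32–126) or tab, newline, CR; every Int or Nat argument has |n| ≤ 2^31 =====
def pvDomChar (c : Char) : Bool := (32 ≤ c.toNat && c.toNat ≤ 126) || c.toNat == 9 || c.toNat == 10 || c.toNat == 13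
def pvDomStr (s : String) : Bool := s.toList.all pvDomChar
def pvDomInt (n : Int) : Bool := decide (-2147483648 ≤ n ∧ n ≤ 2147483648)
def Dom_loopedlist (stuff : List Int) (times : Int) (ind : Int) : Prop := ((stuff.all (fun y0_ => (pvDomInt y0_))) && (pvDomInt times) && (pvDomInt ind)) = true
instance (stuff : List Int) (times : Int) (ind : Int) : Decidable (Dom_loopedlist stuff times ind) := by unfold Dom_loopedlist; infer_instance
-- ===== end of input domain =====

-- B replaces A's one-increment-per-iteration cyclic loop by a closed-form divmod distribution
-- (every slot gets times//n, the first times%n slots after ind one more).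
-- Both Pythons mutate `stuff` (A fully in place, B only the zeroed slot); the equivalence proved
-- here is about the RETURN value.

-- ===== PORT A =====
-- while-loop of A: state (stuff, times, ind); IndexError on stuff[ind] resets ind to -1.
def pvLoopA (stuff : List Int) (times : Int) (ind : Int) : List Int :=
  if _h : 0 < times then
    match hg : PySem.List.pyGet? stuff (ind + 1) with
    | some v => pvLoopA (PySem.List.pySetD stuff (ind + 1) (v + 1)) (times - 1) (ind + 1)
    | none =>
      if he : stuff.isEmpty then stuff   -- totality guard: Python A never reaches the loop with an empty list (stuff[ind] = 0 raises first)
      else pvLoopA stuff times (-1)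
  else stuff
termination_by times.toNat * 2 + (if (PySem.List.pyGet? stuff (ind + 1)).isSome then 0 else 1)
decreasing_by
  · have hx : (if (PySem.List.pyGet? (PySem.List.pySetD stuff (ind + 1) (v + 1)) (ind + 1 + 1)).isSome then 0 else 1) ≤ 1 := by
      split <;> omega
    have hy : (0:Nat) ≤ (if (PySem.List.pyGet? stuff (ind + 1)).isSome then 0 else 1) := by omega
    omega
  · have h0 : (PySem.List.pyGet? stuff ((-1) + 1)).isSome := by
      rcases stuff with _ | ⟨x, t⟩
      · simp at he
      · simp [PySem.List.pyGet?, PySem.List.pyIdx?]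
    rw [hg]
    simp only [h0, Option.isSome_none, if_true, if_false, Bool.false_eq_true]
    omega

def loopedlist (stuff : List Int) (times : Int) (ind : Int) : List Int :=
  match PySem.List.pySet? stuff ind 0 with
  | some s => pvLoopA s times ind
  | none => stuff    -- Python raises IndexError on `stuff[ind] = 0`; excluded by Pre_

-- ===== PORT B =====
def loopedlist_alt (stuff : List Int) (times : Int) (ind : Int) : List Int :=
  match PySem.List.pySet? stuff ind 0 with
  | some s =>
      if times ≤ 0 then s
      else
        match PySem.Int.divmod? times (s.length : Int) with
        | some qr =>
            let start := PySem.Int.mod (ind + 1) (s.length : Int)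
            (PySem.List.enumerate s 0).map
              (fun iv => iv.2 + qr.1 + (if PySem.Int.mod (iv.1 - start) (s.length : Int) < qr.2 then 1 else 0))
        | none => s   -- unreachable: pySet? succeeded, so the list is nonempty
  | none => stuff    -- Python raises IndexError on `stuff[ind] = 0`; excluded by Pre_

-- ===== PRECONDITION & SPEC =====
-- Pre_ excludes exactly the inputs where Python A raises IndexError on its first line
-- (empty list, or ind outside [-len, len)); A returns normally everywhere else.
def Pre_loopedlist (stuff : List Int) (times : Int) (ind : Int) : Prop :=
  stuff ≠ [] ∧ PySem.Raise.InRange stuff.length ind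
instance (stuff : List Int) (times : Int) (ind : Int) : Decidable (Pre_loopedlist stuff times ind) := by unfold Pre_loopedlist; infer_instance

def pvWitness_loopedlist : List Int × Int × Int := ([1, 2, 3], 7, 1)

def Spec_loopedlist (stuff : List Int) (times : Int) (ind : Int) (out : List Int) : Prop := out = loopedlist_alt stuff times ind
instance (stuff : List Int) (times : Int) (ind : Int) (out : List Int) : Decidable (Spec_loopedlist stuff times ind out) := by unfold Spec_loopedlist; infer_instance

-- ===== CLAIM (what is proved, stated in full; the proofs are below) =====
def Claim_equal_loopedlist : Prop := ∀ (stuff : List Int) (times : Int) (ind : Int), Dom_loopedlist stuff times ind → Pre_loopedlist stuff times ind → Spec_loopedlist stuff times ind (loopedlist stuff times ind)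

-- ===== LEMMAS AND PROOFS =====

-- the closed form as a function of an arbitrary start slot p
def pvModel (s : List Int) (t p : Int) : List Int :=
  (PySem.List.enumerate s 0).map
    (fun iv => iv.2 + t / (s.length : Int) + (if (iv.1 - p) % (s.length : Int) < t % (s.length : Int) then 1 else 0))

lemma pv_enum_getElem (s : List Int) (a : Int) (j : Nat) (hj : j < (PySem.List.enumerate s a).length) :
    (PySem.List.enumerate s a)[j] =
      (a + j, s[j]'(by simpa [PySem.List.length_enumerate] using hj)) := by
  induction s generalizing a j with
  | nil => simp [PySem.List.enumerate] at hj
  | cons x t ih =>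
    cases j with
    | zero => simp [PySem.List.enumerate_cons]
    | succ j =>
      have hj' : j < (PySem.List.enumerate t (a + 1)).length := by
        simp [PySem.List.length_enumerate] at hj ⊢
        omega
      simp only [PySem.List.enumerate_cons, List.getElem_cons_succ, ih (a + 1) j hj', Prod.mk.injEq]
      exact ⟨by push_cast; ring, trivial⟩

lemma pv_pyIdx_inRange (m : Nat) (i : Int) (h1 : -(m : Int) ≤ i) (h2 : i < m) :
    PySem.List.pyIdx? m i = some (i % (m : Int)).toNat := by
  unfold PySem.List.pyIdx?
  by_cases h0 : 0 ≤ i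
  · rw [if_pos h0, if_pos h2, Int.emod_eq_of_lt h0 h2]
  · have hm : 0 < (m : Int) := by omega
    rw [if_neg h0, if_pos h1]
    have he : i % (m : Int) = i + m := by
      have h3 : (i + (m : Int) * 1) % (m : Int) = i % (m : Int) :=
        Int.add_mul_emod_self_left i (m : Int) 1
      simp only [mul_one] at h3
      rw [← h3, Int.emod_eq_of_lt (by omega) (by omega)]
    rw [he]
    congr 1
    omega

lemma pv_emod_eq_zero_iff (n x : Int) (hn : 0 < n) (h1 : -n < x) (h2 : x < n) :
    x % n = 0 ↔ x = 0 := by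
  constructor
  · intro h
    rcases Int.dvd_of_emod_eq_zero h with ⟨k, hk⟩
    subst hk
    rcases lt_trichotomy k 0 with hk0 | hk0 | hk0
    · nlinarith
    · simp [hk0]
    · nlinarith
  · intro h; simp [h]

lemma pv_pred_emod (n x : Int) (hn : 0 < n) (hx0 : 0 ≤ x) (hxn : x < n) :
    (x - 1) % n = if x = 0 then n - 1 else x - 1 := by
  split_ifs with h
  · subst h
    have h3 : ((n - 1) + n * (-1)) % n = (n - 1) % n :=
      Int.add_mul_emod_self_left (n - 1) n (-1)
    rw [show (0 : Int) - 1 = (n - 1) + n * (-1) by ring, h3,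
      Int.emod_eq_of_lt (by omega) (by omega)]
  · exact Int.emod_eq_of_lt (by omega) (by omega)

-- one cyclic increment at slot j folds into the closed form
lemma pv_unroll (s : List Int) (t : Int) (j : Nat) (hj : j < s.length) :
    pvModel s t j = pvModel (s.set j (s[j] + 1)) (t - 1) (((j : Int) + 1) % (s.length : Int)) := by
  have hn : 0 < (s.length : Int) := by omega
  set n : Int := (s.length : Int) with hndef
  have hr0 : 0 ≤ t % n := Int.emod_nonneg t (by omega)
  have hrn : t % n < n := Int.emod_lt_of_pos t hn
  have hqr : n * (t / n) + t % n = t := Int.mul_ediv_add_emod t n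
  have hr' : (t - 1) % n = if t % n = 0 then n - 1 else t % n - 1 := by
    have h1 : (t - 1) % n = (t % n - 1) % n := by
      conv_lhs => rw [show t - 1 = (t % n - 1) + n * (t / n) by linarith]
      exact Int.add_mul_emod_self_left _ _ _
    rw [h1, pv_pred_emod n (t % n) hn hr0 hrn]
  have hq' : (t - 1) / n = if t % n = 0 then t / n - 1 else t / n := by
    split_ifs with h
    · rw [show t - 1 = (n - 1) + n * (t / n - 1) by
          have : n * (t / n - 1) = n * (t / n) - n := by ring
          linarith,
        Int.add_mul_ediv_left _ _ (by omega),
        Int.ediv_eq_zero_of_lt (by omega) (by omega)]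
      ring
    · rw [show t - 1 = (t % n - 1) + n * (t / n) by linarith,
        Int.add_mul_ediv_left _ _ (by omega),
        Int.ediv_eq_zero_of_lt (by omega) (by omega)]
      ring
  apply List.ext_getElem
  · simp [pvModel, PySem.List.length_enumerate]
  · intro m hm1 hm2
    have hm : m < s.length := by simpa [pvModel, PySem.List.length_enumerate] using hm1
    have hlen : (s.set j (s[j] + 1)).length = s.length := by simp
    simp only [pvModel, List.getElem_map, hlen]
    rw [pv_enum_getElem s 0 m (by simpa [PySem.List.length_enumerate] using hm),
        pv_enum_getElem (s.set j (s[j] + 1)) 0 m (by simpa [PySem.List.length_enumerate, hlen] using hm)]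
    simp only [List.getElem_set, zero_add, ← hndef]
    set d : Int := ((m : Int) - (j : Int)) % n with hddef
    have hd0 : 0 ≤ d := Int.emod_nonneg _ (by omega)
    have hdn : d < n := Int.emod_lt_of_pos _ hn
    have hdz : d = 0 ↔ m = j := by
      rw [hddef, pv_emod_eq_zero_iff n _ hn (by omega) (by omega)]
      omega
    have hstart : ((m : Int) - ((j : Int) + 1) % n) % n = (d - 1) % n := by
      have e1 : ((m : Int) - ((j : Int) + 1) % n) % n = ((m : Int) - ((j : Int) + 1)) % n := by
        rw [Int.sub_emod, Int.emod_emod_of_dvd _ dvd_rfl, ← Int.sub_emod]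
      have e2 : ((m : Int) - ((j : Int) + 1)) % n = (d - 1) % n := by
        rw [show (m : Int) - ((j : Int) + 1) = ((m : Int) - (j : Int)) - 1 by ring,
          Int.sub_emod ((m : Int) - (j : Int)) 1 n]
        conv_rhs => rw [Int.sub_emod d 1 n, hddef, Int.emod_emod_of_dvd _ dvd_rfl]
      rw [e1, e2]
    rw [hstart, pv_pred_emod n d hn hd0 hdn, hr', hq']
    set q : Int := t / n with hqdef
    set r : Int := t % n with hrdef
    clear hqr hr' hq'
    clear_value q r d n
    by_cases hmj : m = j
    · subst hmj
      have hd : d = 0 := hdz.mpr rfl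
      split_ifs <;> omega
    · have hd : ¬ d = 0 := fun h => hmj (hdz.mp h)
      rw [if_neg (show ¬ j = m from fun h => hmj h.symm)]
      split_ifs <;> omega

lemma pv_model_zero (s : List Int) (p : Int) (hs : s ≠ []) : pvModel s 0 p = s := by
  have hlp : 0 < s.length := List.length_pos_iff.mpr hs
  apply List.ext_getElem
  · simp [pvModel, PySem.List.length_enumerate]
  · intro m hm1 hm2
    have hm : m < s.length := hm2
    simp only [pvModel, List.getElem_map]
    rw [pv_enum_getElem s 0 m (by simpa [PySem.List.length_enumerate] using hm)]
    simp only [Int.zero_ediv, Int.zero_emod, add_zero, zero_add]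
    rw [if_neg (not_lt.mpr (Int.emod_nonneg _ (by omega : (s.length : Int) ≠ 0)))]
    ring

lemma pv_get_set (s : List Int) (i : Int) (v : Int) (h1 : -(s.length : Int) ≤ i) (h2 : i < (s.length : Int)) :
    PySem.List.pyGet? s i = some (s[(i % (s.length : Int)).toNat]'(by
      have hn : 0 < (s.length : Int) := by omega
      have := Int.emod_nonneg i (by omega : (s.length : Int) ≠ 0)
      have := Int.emod_lt_of_pos i hn
      omega)) ∧
    PySem.List.pySetD s i v = s.set (i % (s.length : Int)).toNat v := by
  have hn : 0 < (s.length : Int) := by omega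
  have hmod1 := Int.emod_nonneg i (by omega : (s.length : Int) ≠ 0)
  have hmod2 := Int.emod_lt_of_pos i hn
  have hidx := pv_pyIdx_inRange s.length i (by exact_mod_cast h1) (by exact_mod_cast h2)
  constructor
  · simp [PySem.List.pyGet?, hidx]
  · simp [PySem.List.pySetD, PySem.List.pySet?, hidx]

-- the while loop equals the closed form, by induction on times
lemma pv_loopA_model (k : Nat) : ∀ (s : List Int) (t i : Int), s ≠ [] →
    -(s.length : Int) ≤ i → i < (s.length : Int) → 0 ≤ t → t.toNat ≤ k →
    pvLoopA s t i = pvModel s t ((i + 1) % (s.length : Int)) := by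
  induction k with
  | zero =>
    intro s t i hs h1 h2 ht hk
    have ht0 : t = 0 := by omega
    subst ht0
    rw [pvLoopA]
    simp only [lt_irrefl, dite_false]
    rw [pv_model_zero s _ hs]
  | succ k ih =>
    intro s t i hs h1 h2 ht hk
    by_cases ht0 : t = 0
    · subst ht0
      rw [pvLoopA]
      simp only [lt_irrefl, dite_false]
      rw [pv_model_zero s _ hs]
    have htp : 0 < t := by omega
    have hn : 0 < (s.length : Int) := by
      have := List.length_pos_iff.mpr hs
      omega
    by_cases hcase : i + 1 < (s.length : Int)
    · -- in-range increment step
      have h1' : -(s.length : Int) ≤ i + 1 := by omega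
      obtain ⟨hget, hset⟩ := pv_get_set s (i + 1) (s[((i + 1) % (s.length : Int)).toNat]'(by
          have := Int.emod_nonneg (i + 1) (by omega : (s.length : Int) ≠ 0)
          have := Int.emod_lt_of_pos (i + 1) hn
          omega) + 1) h1' hcase
      set j : Nat := ((i + 1) % (s.length : Int)).toNat with hjdef
      have hj : j < s.length := by
        have := Int.emod_nonneg (i + 1) (by omega : (s.length : Int) ≠ 0)
        have := Int.emod_lt_of_pos (i + 1) hn
        omega
      rw [pvLoopA]
      simp only [htp, dite_true]
      split
      · rename_i v heq
        rw [hget] at heq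
        injection heq with hv
        subst hv
        rw [hset]
        have hlp : 0 < s.length := List.length_pos_iff.mpr hs
        have hs' : s.set j (s[j] + 1) ≠ [] := by
          apply List.ne_nil_of_length_pos
          simpa using hlp
        have hlen' : ((s.set j (s[j] + 1)).length : Int) = (s.length : Int) := by simp
        have hrec := ih (s.set j (s[j] + 1)) (t - 1) (i + 1) hs'
          (by rw [hlen']; omega) (by rw [hlen']; omega) (by omega) (by omega)
        have harg : (i + 1) % (s.length : Int) = (j : Int) := by
          rw [hjdef, Int.toNat_of_nonneg (Int.emod_nonneg (i + 1) (by omega))]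
        rw [hrec, harg, pv_unroll s t j hj]
        congr 1
        rw [hlen', Int.add_emod (i + 1) 1, harg, Int.add_emod (j : Int) 1,
          Int.emod_eq_of_lt (by omega) (by omega : (j : Int) < (s.length : Int))]
      · rename_i heq
        rw [hget] at heq
        exact absurd heq (by simp)
    · -- IndexError step: ind wraps to -1, then slot 0 is incremented
      have hie : i + 1 = (s.length : Int) := by omega
      have hnone : PySem.List.pyGet? s (i + 1) = none := by
        simp only [PySem.List.pyGet?, PySem.List.pyIdx?, hie]
        rw [if_pos (by omega), if_neg (by omega)]
        rfl
      rw [pvLoopA]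
      simp only [htp, dite_true]
      have hne : ¬ s.isEmpty := by simpa using hs
      split
      · rename_i v heq
        rw [hnone] at heq
        exact absurd heq (by simp)
      · rename_i heq
        rw [dif_neg hne]
        obtain ⟨hget, hset⟩ := pv_get_set s ((-1) + 1) (s[(((-1 : Int) + 1) % (s.length : Int)).toNat]'(by
            simp only [neg_add_cancel, Int.zero_emod, Int.toNat_zero]
            omega) + 1) (by omega) (by omega)
        rw [pvLoopA]
        simp only [htp, dite_true]
        split
        · rename_i v heq2
          rw [hget] at heq2
          injection heq2 with hv
          subst hv
          rw [hset]
          have hj0 : 0 < s.length := List.length_pos_iff.mpr hs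
          simp only [neg_add_cancel, Int.zero_emod, Int.toNat_zero]
          have hs' : s.set 0 (s[0] + 1) ≠ [] := by
            apply List.ne_nil_of_length_pos
            simpa using hj0
          have hlen' : ((s.set 0 (s[0] + 1)).length : Int) = (s.length : Int) := by simp
          have hrec := ih (s.set 0 (s[0] + 1)) (t - 1) 0 hs'
            (by rw [hlen']; omega) (by rw [hlen']; omega) (by omega) (by omega)
          have harg : (i + 1) % (s.length : Int) = ((0 : Nat) : Int) := by
            rw [hie]
            simp
          rw [hrec, harg, pv_unroll s t 0 hj0]
          congr 1
          simp
        · rename_i heq2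
          rw [hget] at heq2
          exact absurd heq2 (by simp)

-- ===== VERDICT (by name: the statement is the Claim_ definition above) =====
theorem loopedlist_spec : Claim_equal_loopedlist := by
  intro stuff times ind _ hpre
  obtain ⟨hne, hr1, hr2⟩ := hpre
  unfold Spec_loopedlist loopedlist loopedlist_alt
  have hset : PySem.List.pySet? stuff ind 0 =
      some (stuff.set (ind % (stuff.length : Int)).toNat 0) := by
    simp [PySem.List.pySet?, pv_pyIdx_inRange stuff.length ind hr1 hr2]
  set s : List Int := stuff.set (ind % (stuff.length : Int)).toNat 0 with hsdef
  have hA : (match PySem.List.pySet? stuff ind 0 with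
      | some s => pvLoopA s times ind
      | none => stuff) = pvLoopA s times ind := by rw [hset]
  rw [hA, hset]
  have hlen : s.length = stuff.length := by simp [hsdef]
  have hsne : s ≠ [] := by
    apply List.ne_nil_of_length_pos
    rw [hlen]
    exact List.length_pos_iff.mpr hne
  have hn : 0 < (s.length : Int) := by
    have := List.length_pos_iff.mpr hsne
    omega
  split
  · rename_i s' heq
    injection heq with he
    subst he
    by_cases ht : times ≤ 0
    · rw [if_pos ht, pvLoopA]
      simp only [show ¬ 0 < times by omega, dite_false]
    · rw [if_neg ht]
      have hmodc : ∀ x : Int, PySem.Int.mod x (s.length : Int) = x % (s.length : Int) :=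
        fun x => PySem.Int.mod_eq_emod_of_pos hn
      have hdm : PySem.Int.divmod? times (s.length : Int) = some (times / (s.length : Int), times % (s.length : Int)) := by
        have h1 : Int.fdiv times (s.length : Int) = times / (s.length : Int) := by
          rw [Int.fdiv_eq_ediv, if_pos (Or.inl (by omega : (0:Int) ≤ (s.length : Int)))]
          ring
        have h2 : Int.fmod times (s.length : Int) = times % (s.length : Int) := by
          have h3 := hmodc times
          simpa [PySem.Int.mod] using h3
        simp only [PySem.Int.divmod?, if_neg (by omega : ¬ (s.length : Int) = 0), h1, h2]
      rw [hdm]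
      rw [pv_loopA_model times.toNat s times ind hsne (by rw [hlen]; omega) (by rw [hlen]; omega) (by omega) (le_refl _)]
      simp only [pvModel, hmodc]
  · rename_i heq
    exact absurd heq (by simp)
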